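-- pv_equiv track=rewrite | github.com/GroenteLepel/traveling-salesman | optimiser.py | generate_reverselist
-- ===== SOURCE A (Python) =====
-- def generate_reverselist(n_cities: int):
--     reverselist = []
--     from_city_log = []
--     for from_city in range(n_cities):
--         from_city_log.append(from_city)
--         if from_city == n_cities-1:
--             excl_city_front = 0
--         else:
--             excl_city_front = from_city + 1
--         if from_city == 0:
--             excl_city_back = n_cities-1
--         else:
--             excl_city_back = from_city - 1
--         excl_list = [from_city, excl_city_front, excl_city_back] + from_city_log
--         to_city_choices = [x for x in range(n_cities) if x not in excl_list]
--
--         for to_city in to_city_choices: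
--             reverselist.append([from_city,to_city])
--
--     return reverselist
-- ===== SOURCE B (Python) =====
-- def generate_reverselist(n_cities: int):
--     reverselist = []
--     for from_city in range(n_cities):
--         hi = n_cities - 1 if from_city == 0 else n_cities
--         for to_city in range(from_city + 2, hi):
--             reverselist.append([from_city, to_city])
--     return reverselist
-- ===== Notes on version B (the rewrite author's own statement) =====
-- stated objective: simpler
-- what changed: B drops the from_city log, the exclusion list and the membership filter, and emits for each from_city the directly computed range of valid to_city values (from_city+2 .. n, with the upper bound n-1 when from_city is 0).
import Mathlib
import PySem

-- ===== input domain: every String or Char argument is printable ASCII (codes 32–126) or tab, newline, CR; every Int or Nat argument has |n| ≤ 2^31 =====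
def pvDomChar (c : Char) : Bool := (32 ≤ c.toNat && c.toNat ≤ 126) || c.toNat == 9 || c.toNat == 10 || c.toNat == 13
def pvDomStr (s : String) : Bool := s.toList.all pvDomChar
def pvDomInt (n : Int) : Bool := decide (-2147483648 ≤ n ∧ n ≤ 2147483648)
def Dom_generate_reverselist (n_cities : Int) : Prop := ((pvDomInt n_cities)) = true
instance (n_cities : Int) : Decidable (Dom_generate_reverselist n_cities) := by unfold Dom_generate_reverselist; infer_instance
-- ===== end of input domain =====

-- B replaces A's exclusion-list construction and membership filter by directly computed
-- ranges of valid to_city values (objective: simpler).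

-- ===== PORT A =====
-- 'x not in excl_list': Python's linear membership scan, left to right
def pvNotIn (x : Int) : List Int → Bool
  | [] => true
  | y :: ys => !(x == y) && pvNotIn x ys

-- one iteration of A's outer loop: state = (reverselist, from_city_log)
def pvAbody (n_cities : Int) (st : List (List Int) × List Int) (from_city : Int) :
    List (List Int) × List Int :=
  let from_city_log := st.2 ++ [from_city]
  let excl_city_front := if from_city = n_cities - 1 then 0 else from_city + 1
  let excl_city_back := if from_city = 0 then n_cities - 1 else from_city - 1
  let excl_list := [from_city, excl_city_front, excl_city_back] ++ from_city_log
  let to_city_choices := (PySem.List.pyRange 0 n_cities 1).filter (fun x => pvNotIn x excl_list)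
  (st.1 ++ to_city_choices.map (fun to_city => [from_city, to_city]), from_city_log)

def generate_reverselist (n_cities : Int) : List (List Int) :=
  ((PySem.List.pyRange 0 n_cities 1).foldl (pvAbody n_cities) ([], [])).1

-- ===== PORT B =====
def pvBbody (n_cities : Int) (reverselist : List (List Int)) (from_city : Int) :
    List (List Int) :=
  let hi := if from_city = 0 then n_cities - 1 else n_cities
  reverselist ++ (PySem.List.pyRange (from_city + 2) hi 1).map (fun to_city => [from_city, to_city])

def generate_reverselist_alt (n_cities : Int) : List (List Int) :=
  (PySem.List.pyRange 0 n_cities 1).foldl (pvBbody n_cities) []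

-- ===== PRECONDITION & SPEC =====
def Spec_generate_reverselist (n_cities : Int) (out : List (List Int)) : Prop := out = generate_reverselist_alt n_cities
instance (n_cities : Int) (out : List (List Int)) : Decidable (Spec_generate_reverselist n_cities out) := by unfold Spec_generate_reverselist; infer_instance

-- ===== CLAIM (what is proved, stated in full; the proofs are below) =====
def Claim_equal_generate_reverselist : Prop := ∀ (n_cities : Int), Dom_generate_reverselist n_cities → Spec_generate_reverselist n_cities (generate_reverselist n_cities)

-- ===== LEMMAS AND PROOFS =====

lemma pvNotIn_eq (x : Int) (l : List Int) : pvNotIn x l = !(l.contains x) := by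
  induction l with
  | nil => rfl
  | cons y ys ih => by_cases h : x = y <;> simp [pvNotIn, h, ih]

-- A's filtered to_city list equals B's directly computed range
lemma pv_chunk (n f : Int) (h0 : 0 ≤ f) (_h1 : f < n) :
    (PySem.List.pyRange 0 n 1).filter
      (fun x => pvNotIn x (([f, (if f = n - 1 then 0 else f + 1), (if f = 0 then n - 1 else f - 1)] :
          List Int) ++ PySem.List.pyRange 0 (f + 1) 1))
    = PySem.List.pyRange (f + 2) (if f = 0 then n - 1 else n) 1 := by
  apply List.Perm.eq_of_pairwise (le := (· < ·))
  · intro a b _ _ hab hba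
    omega
  · exact (PySem.List.pairwise_lt_pyRange_one 0 n).filter _
  · exact PySem.List.pairwise_lt_pyRange_one _ _
  · apply List.perm_of_nodup_nodup_toFinset_eq
    · exact (PySem.List.nodup_pyRange_one 0 n).filter _
    · exact PySem.List.nodup_pyRange_one _ _
    · ext x
      simp only [List.mem_toFinset, List.mem_filter, pvNotIn_eq, PySem.List.mem_pyRange_one,
        List.contains_eq_mem, List.mem_append, List.mem_cons, List.not_mem_nil,
        Bool.not_eq_true', decide_eq_false_iff_not]
      by_cases hf0 : f = 0 <;> by_cases hfn : f = n - 1 <;> simp [hf0, hfn] <;> omega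

-- loop invariant: A's fold with log = range 0 a agrees with B's fold over the rest
lemma pv_loop (n : Int) : ∀ (k : Nat) (a : Int), 0 ≤ a → a + k = n →
    ∀ acc, ((PySem.List.pyRange a n 1).foldl (pvAbody n) (acc, PySem.List.pyRange 0 a 1)).1
      = (PySem.List.pyRange a n 1).foldl (pvBbody n) acc := by
  intro k
  induction k with
  | zero =>
    intro a ha hk acc
    rw [show PySem.List.pyRange a n 1 = [] from PySem.List.pyRange_one_eq_nil (by omega)]
    simp
  | succ m ih =>
    intro a ha hk acc
    rw [show PySem.List.pyRange a n 1 = a :: PySem.List.pyRange (a+1) n 1 from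
      PySem.List.pyRange_one_cons (by omega)]
    simp only [List.foldl_cons]
    have hstep : pvAbody n (acc, PySem.List.pyRange 0 a 1) a
        = (pvBbody n acc a, PySem.List.pyRange 0 (a + 1) 1) := by
      simp only [pvAbody, pvBbody]
      rw [← PySem.List.pyRange_one_succ_right ha, pv_chunk n a ha (by omega)]
    rw [hstep]
    exact ih (a + 1) (by omega) (by omega) (pvBbody n acc a)

-- ===== VERDICT (by name: the statement is the Claim_ definition above) =====
theorem generate_reverselist_spec : Claim_equal_generate_reverselist := by
  intro n _
  unfold Spec_generate_reverselist generate_reverselist generate_reverselist_alt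
  by_cases hn : n ≤ 0
  · rw [show PySem.List.pyRange 0 n 1 = [] from PySem.List.pyRange_one_eq_nil hn]
    rfl
  · have h0 : PySem.List.pyRange 0 (0 : Int) 1 = [] :=
      PySem.List.pyRange_one_eq_nil (by omega)
    have := pv_loop n n.toNat 0 (by omega) (by omega) []
    rw [h0] at this
    exact this
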